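-- pv_equiv track=rewrite | github.com/shakinko/ya2017-04-12 | src/akhmelev/lesson02/a_videoregistrator.py | naive_calc
-- ===== SOURCE A (Python) =====
-- def naive_calc(events, interval):
--     # напишите "наивный" O(n^2) алгоритм вычисления времени запуска регистратора
--     local_events=list(events)
--     res=[]
--     while len(local_events)>0:
--         start=min(local_events)
--         res.append(start)
--         stop=start+interval
--
--         i=len(local_events)
--         while i>0:
--             i=i-1
--             if local_events[i]<=stop:
--                 local_events.pop(i)
--     return res
-- ===== SOURCE B (Python) =====
-- def naive_calc(events, interval):
--     # Sort once, then a single greedy sweep: start a recorder at the first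
--     # uncovered event and skip every event within [start, start+interval].
--     res = []
--     stop = None
--     for e in sorted(events):
--         if stop is None or e > stop:
--             res.append(e)
--             stop = e + interval
--     return res
-- ===== Notes on version B (the rewrite author's own statement) =====
-- stated objective: faster
-- what changed: Replaces the repeated min()+quadratic pop scan over a shrinking copy with one sort followed by a single linear greedy sweep.
-- outside the precondition, e.g. on naive_calc([1, 2], -1): A does not finish within the time limit, B returns [1, 2]
import Mathlib
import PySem

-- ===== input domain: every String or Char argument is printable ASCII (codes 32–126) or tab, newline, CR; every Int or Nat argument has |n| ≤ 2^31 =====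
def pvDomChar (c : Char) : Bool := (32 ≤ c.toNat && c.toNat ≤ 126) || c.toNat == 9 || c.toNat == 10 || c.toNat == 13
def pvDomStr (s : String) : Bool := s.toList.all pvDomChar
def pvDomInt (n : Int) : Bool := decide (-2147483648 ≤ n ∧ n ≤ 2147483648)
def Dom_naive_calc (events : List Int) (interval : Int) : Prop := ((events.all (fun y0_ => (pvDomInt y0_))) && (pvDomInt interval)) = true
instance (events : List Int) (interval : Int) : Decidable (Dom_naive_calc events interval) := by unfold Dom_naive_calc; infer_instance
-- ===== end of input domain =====

-- B replaces A's repeated min()+backwards pop scan by one sort and a single greedy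
-- sweep (objective: faster, asymptotic).

-- ===== PORT A =====
-- inner while loop: i counts down; pop local_events[i] when it is ≤ stop
def pvInnerA (l : List Int) (stop : Int) : Nat → List Int
  | 0 => l
  | Nat.succ i =>
      let l' :=
        match PySem.List.pyGet? l (i : Int) with
        | some v =>
            if v ≤ stop then
              match PySem.List.pop? l (i : Int) with
              | some r => r.2
              | none => l
            else l
        | none => l
      pvInnerA l' stop i

-- outer while loop, fueled: under Pre_ each round removes at least the minimum,
-- so fuel = events.length is enough (fuel only guards termination, no algorithm switch)
def pvOuterA (interval : Int) : Nat → List Int → List Int → List Int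
  | 0, _, res => res
  | Nat.succ fuel, l, res =>
      if l.length > 0 then
        match PySem.List.min? l (fun x => x) with
        | some start => pvOuterA interval fuel (pvInnerA l (start + interval) l.length) (res ++ [start])
        | none => res
      else res

def naive_calc (events : List Int) (interval : Int) : List Int :=
  pvOuterA interval events.length events []

-- ===== PORT B =====
-- the single greedy sweep over the sorted events ('stop is None or e > stop')
def pvSweep (interval : Int) : List Int → Option Int → List Int → List Int
  | [], _, res => res
  | e :: rest, stop, res =>
      if (match stop with | none => true | some s => decide (s < e)) then
        pvSweep interval rest (some (e + interval)) (res ++ [e])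
      else
        pvSweep interval rest stop res

def naive_calc_alt (events : List Int) (interval : Int) : List Int :=
  pvSweep interval (PySem.List.sorted events (fun x => x)) none []

-- ===== PRECONDITION & SPEC =====
-- Pre_ excludes only inputs on which the Python A never returns: a nonempty event
-- list with a negative interval makes A's inner loop remove nothing, so its outer
-- while loop diverges.
def Pre_naive_calc (events : List Int) (interval : Int) : Prop :=
  events = [] ∨ 0 ≤ interval
instance (events : List Int) (interval : Int) : Decidable (Pre_naive_calc events interval) := by unfold Pre_naive_calc; infer_instance

def pvWitness_naive_calc : List Int × Int := ([3, 1, 7, 2], 2)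

def Spec_naive_calc (events : List Int) (interval : Int) (out : List Int) : Prop := out = naive_calc_alt events interval
instance (events : List Int) (interval : Int) (out : List Int) : Decidable (Spec_naive_calc events interval out) := by unfold Spec_naive_calc; infer_instance

-- ===== CLAIM (what is proved, stated in full; the proofs are below) =====
def Claim_equal_naive_calc : Prop := ∀ (events : List Int) (interval : Int), Dom_naive_calc events interval → Pre_naive_calc events interval → Spec_naive_calc events interval (naive_calc events interval)

-- ===== LEMMAS AND PROOFS =====

-- canonical fueled greedy chain both ports are reduced to
def pvChain (itv : Int) : Nat → List Int → List Int
  | 0, _ => []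
  | Nat.succ f, l =>
      match PySem.List.min? l (fun x => x) with
      | none => []
      | some m => m :: pvChain itv f (l.filter (fun x => decide (m + itv < x)))

theorem pvInnerA_spec (stop : Int) (a : List Int) : ∀ (b : List Int),
    pvInnerA (a ++ b) stop a.length = a.filter (fun x => decide (stop < x)) ++ b := by
  induction a using List.reverseRecOn with
  | nil => intro b; simp [pvInnerA]
  | append_singleton a x ih =>
      intro b
      have hget : PySem.List.pyGet? (a ++ x :: b) (a.length : Int) = some x := by
        rw [PySem.List.pyGet?_natCast]; simp
      have hpop : PySem.List.pop? (a ++ x :: b) (a.length : Int) = some (x, a ++ b) := by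
        rw [PySem.List.pop?_natCast _ _ (by simp)]
        congr 1
        rw [List.eraseIdx_append_of_length_le (le_refl a.length)]
        simp
      have hlist : (a ++ [x]) ++ b = a ++ x :: b := by simp
      rw [hlist]
      simp only [List.length_append, List.length_singleton]
      by_cases hx : x ≤ stop
      · have hstep : pvInnerA (a ++ x :: b) stop (a.length + 1) = pvInnerA (a ++ b) stop a.length := by
          simp [pvInnerA, hpop, hx]
        rw [hstep, ih b, List.filter_append]
        simp [show ¬ stop < x by omega]
      · have hlx : stop < x := by omega
        have hstep : pvInnerA (a ++ x :: b) stop (a.length + 1) = pvInnerA (a ++ x :: b) stop a.length := by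
          simp [pvInnerA, hx]
        rw [hstep, show a ++ x :: b = a ++ (x :: b) from rfl, ih (x :: b), List.filter_append]
        simp [hlx]

theorem pvInnerA_full (l : List Int) (stop : Int) :
    pvInnerA l stop l.length = l.filter (fun x => decide (stop < x)) := by
  simpa using pvInnerA_spec stop l []

theorem pvMin?_nil : PySem.List.min? ([] : List Int) (fun x => x) = none :=
  (PySem.List.min?_eq_none_iff _ _).mpr rfl

theorem pvMin?_perm {l l' : List Int} (h : l.Perm l') :
    PySem.List.min? l (fun x => x) = PySem.List.min? l' (fun x => x) := by
  cases hl : PySem.List.min? l (fun x => x) with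
  | none =>
      have hl0 : l = [] := (PySem.List.min?_eq_none_iff _ _).mp hl
      subst hl0
      have : l' = [] := h.symm.eq_nil
      rw [this, pvMin?_nil]
  | some m =>
      cases hl' : PySem.List.min? l' (fun x => x) with
      | none =>
          have hl0 : l' = [] := (PySem.List.min?_eq_none_iff _ _).mp hl'
          subst hl0
          have : l = [] := h.eq_nil
          rw [this, pvMin?_nil] at hl
          cases hl
      | some m' =>
          have hm : m ∈ l := PySem.List.min?_mem hl
          have hm' : m' ∈ l' := PySem.List.min?_mem hl'
          have h1 : m ≤ m' := PySem.List.min?_isMin hl m' (h.mem_iff.mpr hm')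
          have h2 : m' ≤ m := PySem.List.min?_isMin hl' m (h.mem_iff.mp hm)
          have : m = m' := le_antisymm h1 h2
          rw [this]

theorem pvChain_perm (itv : Int) : ∀ (f : Nat) {l l' : List Int}, l.Perm l' →
    pvChain itv f l = pvChain itv f l' := by
  intro f
  induction f with
  | zero => intro l l' _; rfl
  | succ f ih =>
      intro l l' h
      simp only [pvChain, pvMin?_perm h]
      cases PySem.List.min? l' (fun x => x) with
      | none => rfl
      | some m => exact congrArg _ (ih (h.filter _))

theorem pvOuterA_chain (itv : Int) (hitv : 0 ≤ itv) : ∀ (fuel : Nat) (l res : List Int),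
    l.length ≤ fuel → pvOuterA itv fuel l res = res ++ pvChain itv fuel l := by
  intro fuel
  induction fuel with
  | zero =>
      intro l res h
      have hl : l = [] := List.eq_nil_of_length_eq_zero (Nat.le_zero.mp h)
      subst hl
      simp [pvOuterA, pvChain]
  | succ fuel ih =>
      intro l res h
      by_cases hl : l = []
      · subst hl
        simp [pvOuterA, pvChain, pvMin?_nil]
      · have hlen : 0 < l.length := List.length_pos_iff.mpr hl
        cases hmin : PySem.List.min? l (fun x => x) with
        | none => exact absurd ((PySem.List.min?_eq_none_iff _ _).mp hmin) hl
        | some m =>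
            have hm : m ∈ l := PySem.List.min?_mem hmin
            have hfail : ¬ (m + itv < m) := by omega
            have hflt : (l.filter (fun x => decide (m + itv < x))).length < l.length := by
              apply List.length_filter_lt_length_iff_exists.mpr
              exact ⟨m, hm, by simpa using hfail⟩
            simp only [pvOuterA, if_pos hlen, hmin, pvInnerA_full]
            rw [ih _ _ (by omega)]
            simp [pvChain, hmin]

theorem pvFoldlMin_self {x : Int} : ∀ {t : List Int}, (∀ y ∈ t, x ≤ y) → t.foldl min x = x := by
  intro t
  induction t generalizing x with
  | nil => intro _; rfl
  | cons y t ih =>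
      intro h
      have hxy : x ≤ y := h y (by simp)
      simp only [List.foldl_cons, min_eq_left hxy]
      exact ih (fun z hz => h z (by simp [hz]))

theorem pvMin?_cons_of_le {x : Int} {t : List Int} (h : ∀ y ∈ t, x ≤ y) :
    PySem.List.min? (x :: t) (fun y => y) = some x := by
  rw [PySem.List.min?_id_cons, pvFoldlMin_self h]

theorem pvSweep_some (itv : Int) (hitv : 0 ≤ itv) : ∀ (l : List Int),
    l.Pairwise (· ≤ ·) → ∀ (s : Int) (res : List Int) (f : Nat),
    (l.filter (fun x => decide (s < x))).length ≤ f →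
    pvSweep itv l (some s) res = res ++ pvChain itv f (l.filter (fun x => decide (s < x))) := by
  intro l
  induction l with
  | nil => intro _ s res f _; cases f <;> simp [pvSweep, pvChain, pvMin?_nil]
  | cons x xs ih =>
      intro hp s res f hf
      have hx_le : ∀ y ∈ xs, x ≤ y := (List.pairwise_cons.mp hp).1
      have hp' : xs.Pairwise (· ≤ ·) := (List.pairwise_cons.mp hp).2
      by_cases hsx : s < x
      · -- x starts a new recorder
        simp only [List.filter_cons, decide_eq_true hsx, if_pos] at hf ⊢
        obtain ⟨f', rfl⟩ : ∃ f', f = f' + 1 := by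
          cases f with
          | zero => simp at hf
          | succ f' => exact ⟨f', rfl⟩
        have hmin : PySem.List.min? (x :: xs.filter (fun y => decide (s < y))) (fun y => y) = some x :=
          pvMin?_cons_of_le (fun y hy => hx_le y (List.mem_of_mem_filter hy))
        have hfx : ¬ (x + itv < x) := by omega
        have hff : (x :: xs.filter (fun y => decide (s < y))).filter (fun y => decide (x + itv < y))
            = xs.filter (fun y => decide (x + itv < y)) := by
          simp only [List.filter_cons, decide_eq_false hfx, List.filter_filter, Bool.false_eq_true, if_false]
          apply List.filter_congr
          intro y _
          by_cases hy : x + itv < y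
          · have : s < y := by omega
            simp [hy, this]
          · simp [hy]
        have hsub : (xs.filter (fun y => decide (x + itv < y))).length ≤ f' := by
          have := congrArg List.length hff
          simp only [List.filter_cons, decide_eq_false hfx, Bool.false_eq_true, if_false,
            List.filter_filter] at this
          calc (xs.filter (fun y => decide (x + itv < y))).length
              = ((xs.filter (fun y => decide (s < y))).filter (fun y => decide (x + itv < y))).length := by
                rw [List.filter_filter]
                congr 1
                apply List.filter_congr
                intro y _
                by_cases hy : x + itv < y
                · have : s < y := by omega
                  simp [hy, this]
                · simp [hy]
            _ ≤ (xs.filter (fun y => decide (s < y))).length := List.length_filter_le _ _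
            _ ≤ f' := by simpa using Nat.lt_succ_iff.mp hf
        simp only [pvSweep, decide_eq_true hsx, if_pos]
        rw [ih hp' (x + itv) (res ++ [x]) f' hsub]
        simp [pvChain, hmin, hff]
      · -- x is covered by the running recorder
        have hxle : ¬ (decide (s < x) = true) := by simpa using hsx
        simp only [List.filter_cons, hxle, Bool.false_eq_true, if_false] at hf ⊢
        simp only [pvSweep]
        rw [if_neg (by simpa using hsx)]
        exact ih hp' s res f hf

theorem pvSweep_none (itv : Int) (hitv : 0 ≤ itv) : ∀ (l : List Int),
    l.Pairwise (· ≤ ·) → ∀ (res : List Int) (f : Nat), l.length ≤ f →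
    pvSweep itv l none res = res ++ pvChain itv f l := by
  intro l hp res f hf
  cases l with
  | nil => cases f <;> simp [pvSweep, pvChain, pvMin?_nil]
  | cons x xs =>
      have hx_le : ∀ y ∈ xs, x ≤ y := (List.pairwise_cons.mp hp).1
      have hp' : xs.Pairwise (· ≤ ·) := (List.pairwise_cons.mp hp).2
      obtain ⟨f', rfl⟩ : ∃ f', f = f' + 1 := by
        cases f with
        | zero => simp at hf
        | succ f' => exact ⟨f', rfl⟩
      have hmin : PySem.List.min? (x :: xs) (fun y => y) = some x := pvMin?_cons_of_le hx_le
      have hfx : ¬ (x + itv < x) := by omega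
      have hsub : (xs.filter (fun y => decide (x + itv < y))).length ≤ f' := by
        calc (xs.filter (fun y => decide (x + itv < y))).length
            ≤ xs.length := List.length_filter_le _ _
          _ ≤ f' := by simpa using Nat.lt_succ_iff.mp hf
      simp only [pvSweep, if_pos]
      rw [pvSweep_some itv hitv xs hp' (x + itv) (res ++ [x]) f' (by
        calc (xs.filter (fun y => decide (x + itv < y))).length ≤ xs.length := List.length_filter_le _ _
          _ ≤ f' := by simpa using Nat.lt_succ_iff.mp hf)]
      simp only [pvChain, hmin]
      rw [List.filter_cons, if_neg (by simpa using hfx)]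
      simp

-- ===== VERDICT (by name: the statement is the Claim_ definition above) =====
theorem naive_calc_spec : Claim_equal_naive_calc := by
  intro events interval _ hpre
  unfold Spec_naive_calc
  rcases hpre with hnil | hitv
  · subst hnil
    rfl
  · unfold naive_calc naive_calc_alt
    rw [pvOuterA_chain interval hitv events.length events [] (le_refl _)]
    rw [pvSweep_none interval hitv (PySem.List.sorted events (fun x => x))
      (by simpa using PySem.List.sorted_pairwise events (fun x => x)) [] events.length
      (by simp [PySem.List.length_sorted])]
    simp only [List.nil_append]
    exact (pvChain_perm interval events.length (PySem.List.sorted_perm events (fun x => x) false)).symm
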